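-- pv_equiv track=rewrite | github.com/mars71003219/ar | recognizer/core/inference_modes.py | _calculate_event_statistics
-- ===== SOURCE A (Python) =====
-- from typing import Dict, Any, List, Tuple
--
-- def _calculate_event_statistics(classifications: List[Dict[str, Any]]) -> Tuple[int, int]:
--     """이벤트 통계 계산"""
--     event_count = sum(1 for c in classifications if c.get('prediction', 0) == 1)
--
--     # 최대 연속 이벤트 계산
--     consecutive_count = 0
--     max_consecutive = 0
--
--     for classification in classifications:
--         if classification.get('prediction', 0) == 1:
--             consecutive_count += 1
--             max_consecutive = max(max_consecutive, consecutive_count)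
--         else:
--             consecutive_count = 0
--
--     return event_count, max_consecutive
-- ===== SOURCE B (Python) =====
-- from typing import Dict, Any, List, Tuple
-- from itertools import groupby
--
-- def _calculate_event_statistics(classifications: List[Dict[str, Any]]) -> Tuple[int, int]:
--     preds = [c.get('prediction', 0) == 1 for c in classifications]
--     run_lengths = [len(list(g)) for key, g in groupby(preds) if key]
--     return sum(preds), max(run_lengths, default=0)
-- ===== Notes on version B (the rewrite author's own statement) =====
-- stated objective: alternative
-- what changed: Replaces the running-counter-with-reset loop by a declarative pipeline: build the boolean prediction sequence once, sum it for the event count, and take the longest True run via itertools.groupby over maximal runs.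
import Mathlib
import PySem

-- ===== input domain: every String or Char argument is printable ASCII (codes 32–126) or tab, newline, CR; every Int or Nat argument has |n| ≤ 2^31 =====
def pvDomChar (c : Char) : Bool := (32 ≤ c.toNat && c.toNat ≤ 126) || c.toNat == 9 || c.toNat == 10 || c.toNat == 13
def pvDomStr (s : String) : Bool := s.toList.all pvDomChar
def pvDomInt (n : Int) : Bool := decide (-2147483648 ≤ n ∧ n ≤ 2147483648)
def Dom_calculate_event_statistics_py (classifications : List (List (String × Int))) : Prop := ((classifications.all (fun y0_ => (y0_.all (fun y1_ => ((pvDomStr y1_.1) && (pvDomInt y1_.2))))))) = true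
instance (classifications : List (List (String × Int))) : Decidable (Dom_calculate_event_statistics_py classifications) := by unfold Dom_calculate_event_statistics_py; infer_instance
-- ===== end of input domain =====

-- B replaces A's running-counter-with-reset loop by a pipeline: build the boolean
-- prediction sequence once, sum it, and take the longest True run via grouping
-- consecutive equal values (itertools.groupby); objective: alternative decomposition.

-- ===== PORT A =====
def calculate_event_statistics_py (classifications : List (List (String × Int))) : Int × Int :=
  let event_count : Int := classifications.foldl
    (fun acc c => if (PySem.Dict.mk c).getD "prediction" 0 == 1 then acc + 1 else acc) 0
  let s : Int × Int := classifications.foldl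
    (fun s c => if (PySem.Dict.mk c).getD "prediction" 0 == 1
                then (s.1 + 1, max s.2 (s.1 + 1))
                else (0, s.2)) (0, 0)
  (event_count, s.2)

-- ===== PORT B =====
-- port of itertools.groupby specialised to run-length pairs (key, length)
def pvRuns : List Bool → List (Bool × Int)
  | [] => []
  | b :: t => match pvRuns t with
    | [] => [(b, 1)]
    | (b', n) :: r => if b == b' then (b, n + 1) :: r else (b, 1) :: (b', n) :: r

def calculate_event_statistics_py_alt (classifications : List (List (String × Int))) : Int × Int :=
  let preds : List Bool := classifications.map (fun c => (PySem.Dict.mk c).getD "prediction" 0 == 1)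
  let run_lengths : List Int := (pvRuns preds).filterMap (fun kn => if kn.1 then some kn.2 else none)
  (((preds.count true : Nat) : Int), run_lengths.foldl max 0)

-- ===== PRECONDITION & SPEC =====
def Spec_calculate_event_statistics_py (classifications : List (List (String × Int))) (out : Int × Int) : Prop := out = calculate_event_statistics_py_alt classifications
instance (classifications : List (List (String × Int))) (out : Int × Int) : Decidable (Spec_calculate_event_statistics_py classifications out) := by unfold Spec_calculate_event_statistics_py; infer_instance

-- ===== CLAIM (what is proved, stated in full; the proofs are below) =====
def Claim_equal_calculate_event_statistics_py : Prop := ∀ (classifications : List (List (String × Int))), Dom_calculate_event_statistics_py classifications → Spec_calculate_event_statistics_py classifications (calculate_event_statistics_py classifications)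

-- ===== LEMMAS AND PROOFS =====

-- A's running max-consecutive recursion, on the boolean sequence
def pvG : List Bool → Int → Int
  | [], _ => 0
  | true :: t, cc => max (cc + 1) (pvG t (cc + 1))
  | false :: t, _ => pvG t 0

def pvTr (rs : List (Bool × Int)) : List Int :=
  rs.filterMap (fun kn => if kn.1 then some kn.2 else none)

lemma pv_count_fold {α : Type} (f : α → Bool) : ∀ (l : List α) (acc : Int),
    l.foldl (fun a c => if f c then a + 1 else a) acc
      = acc + (((l.map f).count true : Nat) : Int) := by
  intro l
  induction l with
  | nil => intro acc; simp
  | cons x t ih =>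
    intro acc
    by_cases h : f x = true <;> simp [h, ih] <;> ring

lemma pv_loop_snd {α : Type} (f : α → Bool) : ∀ (l : List α) (cc mc : Int), 0 ≤ mc →
    (l.foldl (fun (s : Int × Int) c =>
        if f c then (s.1 + 1, max s.2 (s.1 + 1)) else (0, s.2)) (cc, mc)).2
      = max mc (pvG (l.map f) cc) := by
  intro l
  induction l with
  | nil => intro cc mc h; simp [pvG]; omega
  | cons x t ih =>
    intro cc mc h
    by_cases hx : f x = true
    · simp only [List.foldl_cons, List.map_cons, hx, if_true, pvG]
      rw [ih (cc + 1) (max mc (cc + 1)) (le_trans h (le_max_left _ _)), max_assoc]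
    · simp only [List.foldl_cons, List.map_cons, hx, if_false, Bool.false_eq_true, pvG]
      exact ih 0 mc h

lemma pvG_nonneg : ∀ (l : List Bool) (cc : Int), 0 ≤ pvG l cc := by
  intro l
  induction l with
  | nil => intro cc; simp [pvG]
  | cons b t ih =>
    intro cc
    cases b with
    | true => exact le_trans (ih (cc + 1)) (le_max_right _ _)
    | false => exact ih 0

lemma pv_foldl_max (l : List Int) : ∀ a b : Int, l.foldl max (max a b) = max a (l.foldl max b) := by
  induction l with
  | nil => intro a b; rfl
  | cons x t ih => intro a b; simp only [List.foldl_cons]; rw [max_assoc, ih]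

lemma pv_F_cons (n : Int) (rl : List Int) :
    rl.foldl max (max 0 n) = max n (rl.foldl max 0) := by
  rw [max_comm (0 : Int) n]
  exact pv_foldl_max rl n 0

lemma pvRuns_cons (b : Bool) (t : List Bool) :
    pvRuns (b :: t) = (match pvRuns t with
      | [] => [(b, 1)]
      | (b', n) :: r => if b == b' then (b, n + 1) :: r else (b, 1) :: (b', n) :: r) := rfl

lemma pvRuns_ne_nil (b : Bool) (t : List Bool) : pvRuns (b :: t) ≠ [] := by
  intro h
  rw [pvRuns_cons] at h
  revert h
  cases pvRuns t with
  | nil => simp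
  | cons q r =>
    obtain ⟨b', n⟩ := q
    by_cases hb : (b == b') = true <;> simp [hb]

lemma pvRuns_pos : ∀ (l : List Bool), ∀ p ∈ pvRuns l, 1 ≤ p.2 := by
  intro l
  induction l with
  | nil => simp [pvRuns]
  | cons b t ih =>
    intro p hp
    simp only [pvRuns] at hp
    cases h : pvRuns t with
    | nil =>
      rw [h] at hp
      replace hp : p ∈ [(b, (1 : Int))] := hp
      simp at hp
      simp [hp]
    | cons q r =>
      obtain ⟨b', n⟩ := q
      rw [h] at hp
      replace hp : p ∈ (if (b == b') = true then (b, n + 1) :: r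
                        else (b, 1) :: (b', n) :: r) := hp
      have hn : 1 ≤ n := by simpa using ih (b', n) (h ▸ List.mem_cons_self)
      by_cases hb : (b == b') = true
      · rw [if_pos hb] at hp
        rcases List.mem_cons.mp hp with hp | hp
        · simp [hp]; omega
        · exact ih p (h ▸ List.mem_cons_of_mem _ hp)
      · rw [if_neg hb] at hp
        rcases List.mem_cons.mp hp with hp | hp
        · simp [hp]
        · rcases List.mem_cons.mp hp with hp | hp
          · simp [hp]; omega
          · exact ih p (h ▸ List.mem_cons_of_mem _ hp)

lemma pvG_runs : ∀ (l : List Bool) (cc : Int), 0 ≤ cc →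
    pvG l cc = (match pvRuns l with
      | (true, n) :: r => max (cc + n) ((pvTr r).foldl max 0)
      | rs => (pvTr rs).foldl max 0) := by
  intro l
  induction l with
  | nil => intro cc _; simp [pvG, pvRuns, pvTr]
  | cons b t ih =>
    intro cc hcc
    cases h : pvRuns t with
    | nil =>
      have ht : t = [] := by
        cases t with
        | nil => rfl
        | cons x s => exact absurd h (pvRuns_ne_nil x s)
      subst ht
      cases b <;> simp [pvG, pvRuns, pvTr]
    | cons q r =>
      obtain ⟨b', n⟩ := q
      have hn : 1 ≤ n := by simpa using pvRuns_pos t (b', n) (h ▸ List.mem_cons_self)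
      cases b with
      | true =>
        have hG : pvG (true :: t) cc = max (cc + 1) (pvG t (cc + 1)) := rfl
        rw [hG, ih (cc + 1) (by omega), h]
        cases b' with
        | true =>
          have hrw : pvRuns (true :: t) = (true, n + 1) :: r := by
            rw [pvRuns_cons, h]; rfl
          rw [hrw]
          show max (cc + 1) (max (cc + 1 + n) ((pvTr r).foldl max 0))
              = max (cc + (n + 1)) ((pvTr r).foldl max 0)
          rw [← max_assoc]
          congr 1
          omega
        | false =>
          have hrw : pvRuns (true :: t) = (true, 1) :: (false, n) :: r := by
            rw [pvRuns_cons, h]; rfl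
          rw [hrw]
      | false =>
        have hG : pvG (false :: t) cc = pvG t 0 := rfl
        rw [hG, ih 0 le_rfl, h]
        cases b' with
        | true =>
          have hrw : pvRuns (false :: t) = (false, 1) :: (true, n) :: r := by
            rw [pvRuns_cons, h]; rfl
          rw [hrw]
          show max ((0 : Int) + n) ((pvTr r).foldl max 0)
              = (pvTr ((false, 1) :: (true, n) :: r)).foldl max 0
          rw [show pvTr ((false, 1) :: (true, n) :: r) = n :: pvTr r from by simp [pvTr]]
          rw [List.foldl_cons, pv_F_cons]
          omega
        | false =>
          have hrw : pvRuns (false :: t) = (false, n + 1) :: r := by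
            rw [pvRuns_cons, h]; rfl
          rw [hrw]
          show (pvTr ((false, n) :: r)).foldl max 0
              = (pvTr ((false, n + 1) :: r)).foldl max 0
          simp [pvTr]

lemma pvG_eq_runs_fold (l : List Bool) :
    pvG l 0 = (pvTr (pvRuns l)).foldl max 0 := by
  rw [pvG_runs l 0 le_rfl]
  cases h : pvRuns l with
  | nil => rfl
  | cons q r =>
    obtain ⟨b', n⟩ := q
    cases b' with
    | true =>
      show max ((0 : Int) + n) ((pvTr r).foldl max 0)
          = (pvTr ((true, n) :: r)).foldl max 0
      rw [show pvTr ((true, n) :: r) = n :: pvTr r from by simp [pvTr]]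
      rw [List.foldl_cons, pv_F_cons]
      omega
    | false =>
      show ((pvTr ((false, n) :: r)).foldl max 0)
          = (pvTr ((false, n) :: r)).foldl max 0
      rfl

-- ===== VERDICT (by name: the statement is the Claim_ definition above) =====
theorem calculate_event_statistics_py_spec : Claim_equal_calculate_event_statistics_py := by
  intro cls _
  unfold Spec_calculate_event_statistics_py calculate_event_statistics_py calculate_event_statistics_py_alt
  refine Prod.ext ?_ ?_
  · rw [pv_count_fold (fun c => (PySem.Dict.mk c).getD "prediction" 0 == 1) cls 0]
    simp
  · rw [pv_loop_snd (fun c => (PySem.Dict.mk c).getD "prediction" 0 == 1) cls 0 0 le_rfl]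
    rw [max_eq_right (pvG_nonneg _ _), pvG_eq_runs_fold]
    rfl
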